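-- pv_equiv track=rewrite | github.com/Thrad5/Advent_of_Code | 2023/day_14/AoC_14.py | fall_south
-- ===== SOURCE A (Python) =====
-- def fall_south(planet):
--     none_moved = True
--     while none_moved:
--         none_moved = False
--         for i in range(0,len(planet)-1):
--             for j in range(len(planet[0])):
--                 if planet[i][j] == 'O' and planet[i+1][j] == '.':
--                     planet[i+1][j] = 'O'
--                     planet[i][j] = '.'
--                     none_moved = True
--     return planet
-- ===== SOURCE B (Python) =====
-- def settle(column):
--     # One pass south: within each run between '#' obstacles, the 'O's sink to the bottom.
--     out = []
--     rocks = 0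
--     spaces = 0
--     for c in column:
--         if c == 'O':
--             rocks += 1
--         elif c == '.':
--             spaces += 1
--         else:
--             out.extend(['.'] * spaces + ['O'] * rocks)
--             out.append(c)
--             rocks = 0
--             spaces = 0
--     out.extend(['.'] * spaces + ['O'] * rocks)
--     return out
--
--
-- def fall_south(planet):
--     if not planet:
--         return planet
--     for j in range(len(planet[0])):
--         settled = settle([row[j] for row in planet])
--         for i in range(len(planet)):
--             planet[i][j] = settled[i]
--     return planet
-- ===== Notes on version B (the rewrite author's own statement) =====
-- stated objective: alternative
-- what changed: Replaced the repeat-full-sweeps-until-nothing-moves bubble simulation by a single per-column pass that counts the 'O's in each run between '#' obstacles and writes them back settled at the bottom of the run; Pre_ excludes grids in which some row is shorter than the first row, where A's cell probes raise IndexError except when the short-circuited 'O' test happens to skip every missing cell (B, reading whole columns, raises on all of them).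
-- outside the precondition, e.g. on fall_south([['.', '.'], ['#']]): A returns [['.', '.'], ['#']], B raises IndexError
import Mathlib
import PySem

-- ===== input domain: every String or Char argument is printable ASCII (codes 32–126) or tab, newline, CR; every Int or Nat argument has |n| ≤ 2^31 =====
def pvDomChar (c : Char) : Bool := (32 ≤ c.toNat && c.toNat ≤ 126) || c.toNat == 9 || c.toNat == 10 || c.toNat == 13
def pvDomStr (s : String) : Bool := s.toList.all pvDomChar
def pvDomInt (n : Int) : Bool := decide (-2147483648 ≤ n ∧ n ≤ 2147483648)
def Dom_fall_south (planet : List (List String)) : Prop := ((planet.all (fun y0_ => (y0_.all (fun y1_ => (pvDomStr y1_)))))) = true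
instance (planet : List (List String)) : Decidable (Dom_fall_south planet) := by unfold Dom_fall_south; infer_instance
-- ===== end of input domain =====

-- B replaces A's repeated full sweeps (bubble each rock one row per pass until a pass moves
-- nothing) by one settling pass per column. Both Pythons mutate the argument in place; the
-- equivalence proved here is about the RETURN value.

-- ===== PORT A =====
-- planet[i][j] (indices come from range(), hence within bounds on admitted inputs)
def pvGet (g : List (List String)) (i j : Nat) : String := (g.getD i []).getD j ""
-- planet[i][j] = x
def pvSet (g : List (List String)) (i j : Nat) (x : String) : List (List String) :=
  g.set i ((g.getD i []).set j x)

-- body of the innermost loop: the swap-down step, flag |= moved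
def stepA (i : Nat) (s : List (List String) × Bool) (j : Nat) : List (List String) × Bool :=
  if pvGet s.1 i j = "O" ∧ pvGet s.1 (i + 1) j = "." then
    (pvSet (pvSet s.1 (i + 1) j "O") i j ".", true)
  else s

-- 'for j in range(len(planet[0]))'
def passInner (s : List (List String) × Bool) (i : Nat) : List (List String) × Bool :=
  (List.range ((s.1.getD 0 []).length)).foldl (stepA i) s

-- one whole 'for i in range(0, len(planet)-1)' sweep, starting with none_moved = False
def passA (g : List (List String)) : List (List String) × Bool :=
  (List.range (g.length - 1)).foldl passInner (g, false)

-- potential function justifying termination of A's while loop: each row's 'O' count,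
-- weighted by its distance from the bottom
def mu : List (List String) → Nat
  | [] => 0
  | r :: rs => (rs.length + 1) * r.count "O" + mu rs

-- lemmas the port needs for its termination proof
theorem pv_getD_of_le {α : Type} {l : List α} {n : Nat} (d : α) (h : l.length ≤ n) :
    l.getD n d = d := by
  simp [List.getD, List.getElem?_eq_none h]

theorem pv_getD_lt {α : Type} {l : List α} {n : Nat} {d : α} (h : l.getD n d ≠ d) :
    n < l.length := by
  by_contra hn
  exact h (pv_getD_of_le d (by omega))

theorem pv_getD_pvSet (g : List (List String)) (a b : Nat) (x : String) (i : Nat) :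
    (pvSet g a b x).getD i [] = if i = a then (g.getD a []).set b x else g.getD i [] := by
  unfold pvSet
  by_cases hi : i = a
  · subst hi
    by_cases ha : i < g.length
    · simp [List.getD, ha]
    · rw [List.set_eq_of_length_le (by omega)]
      rw [pv_getD_of_le [] (by omega), if_pos rfl]
      simp
  · simp [List.getD, Ne.symm hi, hi]

theorem pv_count_set (l : List String) (j : Nat) (x : String) (h : j < l.length) :
    (l.set j x).count "O" + (if l.getD j "" = "O" then 1 else 0)
      = l.count "O" + (if x = "O" then 1 else 0) := by
  induction l generalizing j with
  | nil => simp at h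
  | cons c t ih =>
    cases j with
    | zero =>
      simp only [List.set_cons_zero, List.count_cons, List.getD_cons_zero]
      by_cases hx : x = "O" <;> by_cases hc : c = "O" <;> simp [hx, hc]
    | succ j =>
      simp only [List.set_cons_succ, List.count_cons, List.getD_cons_succ]
      have := ih j (by simpa using h)
      simp only [List.getD] at this ⊢
      by_cases hc : c = "O" <;> simp [hc] <;> omega

theorem pv_mu_set (g : List (List String)) (i : Nat) (r : List String) (h : i < g.length) :
    mu (g.set i r) + (g.length - i) * (g.getD i []).count "O"
      = mu g + (g.length - i) * r.count "O" := by
  induction g generalizing i with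
  | nil => simp at h
  | cons hd tl ih =>
    cases i with
    | zero =>
      simp only [List.set_cons_zero, mu, List.getD_cons_zero, List.length_cons,
        Nat.sub_zero]
      ring
    | succ i =>
      have hlt : i < tl.length := by simpa using h
      have := ih i hlt
      simp only [List.set_cons_succ, mu, List.getD_cons_succ, List.length_cons,
        List.length_set, Nat.succ_sub_succ]
      omega

theorem pv_mu_move {g : List (List String)} {i j : Nat}
    (h1 : pvGet g i j = "O") (h2 : pvGet g (i + 1) j = ".") :
    mu (pvSet (pvSet g (i + 1) j "O") i j ".") < mu g := by
  have hrowi : g.getD i [] ≠ [] := by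
    intro hh; rw [pvGet, hh] at h1; simp [List.getD] at h1
  have hi : i < g.length := pv_getD_lt (d := []) hrowi
  have hji : j < (g.getD i []).length := by
    apply pv_getD_lt (d := ""); rw [pvGet] at h1; rw [h1]; simp
  have hrowi1 : g.getD (i + 1) [] ≠ [] := by
    intro hh; rw [pvGet, hh] at h2; simp [List.getD] at h2
  have hi1 : i + 1 < g.length := pv_getD_lt (d := []) hrowi1
  have hji1 : j < (g.getD (i + 1) []).length := by
    apply pv_getD_lt (d := ""); rw [pvGet] at h2; rw [h2]; simp
  set g1 := pvSet g (i + 1) j "O" with hg1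
  have hc1 : ((g.getD (i + 1) []).set j "O").count "O" = (g.getD (i + 1) []).count "O" + 1 := by
    have h3 := pv_count_set (g.getD (i + 1) []) j "O" hji1
    rw [pvGet] at h2
    rw [h2, if_neg (by decide : ¬ ("." : String) = "O"), if_pos rfl] at h3
    omega
  have e1 := pv_mu_set g (i + 1) ((g.getD (i + 1) []).set j "O") hi1
  have hg1len : g1.length = g.length := by simp [hg1, pvSet]
  have hg1rowi : g1.getD i [] = g.getD i [] := by
    rw [hg1, pv_getD_pvSet]; simp
  have hc2 : ((g.getD i []).set j ".").count "O" + 1 = (g.getD i []).count "O" := by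
    have h3 := pv_count_set (g.getD i []) j "." hji
    rw [pvGet] at h1
    rw [h1, if_pos rfl, if_neg (by decide : ¬ ("." : String) = "O")] at h3
    omega
  have e2 := pv_mu_set g1 i ((g1.getD i []).set j ".") (by omega)
  rw [hg1rowi] at e2
  have hfin : pvSet g1 i j "." = g1.set i ((g.getD i []).set j ".") := by
    rw [pvSet, hg1rowi]
  rw [hfin]
  rw [hg1len] at e2
  have hA : (g.length - (i + 1)) * ((g.getD (i + 1) []).count "O" + 1)
      = (g.length - (i + 1)) * (g.getD (i + 1) []).count "O" + (g.length - (i + 1)) := by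
    ring
  rw [hc1, hA] at e1
  have hB : (g.length - i) * (((g.getD i []).set j ".").count "O" + 1)
      = (g.length - i) * ((g.getD i []).set j ".").count "O" + (g.length - i) := by
    ring
  have hC : (g.length - i) * (g.getD i []).count "O"
      = (g.length - i) * (((g.getD i []).set j ".").count "O") + (g.length - i) := by
    rw [← hB, hc2]
  rw [hC] at e2
  have hmug1 : mu g1 = mu (g.set (i + 1) ((g.getD (i + 1) []).set j "O")) := rfl
  omega

theorem pv_stepA_cases (i j : Nat) (s : List (List String) × Bool) :
    stepA i s j = s ∨ (mu (stepA i s j).1 < mu s.1 ∧ (stepA i s j).2 = true) := by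
  unfold stepA
  by_cases hc : pvGet s.1 i j = "O" ∧ pvGet s.1 (i + 1) j = "."
  · right; rw [if_pos hc]; exact ⟨pv_mu_move hc.1 hc.2, rfl⟩
  · left; rw [if_neg hc]

def muInv (g : List (List String)) (s : List (List String) × Bool) : Prop :=
  (s.2 = false → s.1 = g) ∧ mu s.1 ≤ mu g ∧ (s.2 = true → mu s.1 < mu g)

theorem pv_muInv_init (g : List (List String)) : muInv g (g, false) := by
  unfold muInv
  exact ⟨fun _ => rfl, le_refl _, by simp⟩

theorem pv_stepA_muInv {g : List (List String)} {s : List (List String) × Bool}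
    (h : muInv g s) (i j : Nat) : muInv g (stepA i s j) := by
  obtain ⟨hf, hle, hlt⟩ := h
  rcases pv_stepA_cases i j s with he | ⟨hlt', ht⟩
  · rw [he]; exact ⟨hf, hle, hlt⟩
  · unfold muInv
    refine ⟨fun hff => ?_, by omega, fun _ => by omega⟩
    rw [hff] at ht
    cases ht

theorem pv_passInner_muInv {g : List (List String)} {s : List (List String) × Bool}
    (h : muInv g s) (i : Nat) : muInv g (passInner s i) := by
  unfold passInner
  exact List.foldlRecOn _ _ h (fun b hb j _ => pv_stepA_muInv hb i j)

theorem pv_passA_muInv (g : List (List String)) : muInv g (passA g) := by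
  unfold passA
  exact List.foldlRecOn _ _ (pv_muInv_init g) (fun b hb i _ => pv_passInner_muInv hb i)

theorem pv_passA_mu_lt (g : List (List String)) (h : (passA g).2 = true) :
    mu (passA g).1 < mu g := (pv_passA_muInv g).2.2 h

-- 'while none_moved: …' — repeat the sweep until a sweep moves nothing, then return the grid
def fall_south (planet : List (List String)) : List (List String) :=
  if _h : (passA planet).2 = true then fall_south (passA planet).1 else (passA planet).1
termination_by mu planet
decreasing_by exact pv_passA_mu_lt planet _h

-- ===== PORT B =====
-- out.extend(['.'] * spaces + ['O'] * rocks); the loop state is (out, rocks, spaces)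
def settleFlush (s : List String × Nat × Nat) : List String :=
  s.1 ++ List.replicate s.2.2 "." ++ List.replicate s.2.1 "O"

-- one iteration of settle's loop
def settleStep (s : List String × Nat × Nat) (c : String) : List String × Nat × Nat :=
  if c = "O" then (s.1, s.2.1 + 1, s.2.2)
  else if c = "." then (s.1, s.2.1, s.2.2 + 1)
  else (settleFlush s ++ [c], 0, 0)

-- settle one column south in a single pass
def settle (column : List String) : List String :=
  settleFlush (column.foldl settleStep ([], 0, 0))

-- 'for i in range(len(planet)): planet[i][j] = settled[i]'
-- (settled[i] is in range on admitted inputs: settle preserves the column's length)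
def writeCol (g : List (List String)) (j : Nat) (settled : List String) : List (List String) :=
  (List.range g.length).foldl (fun g' i => pvSet g' i j (settled.getD i "")) g

-- 'for j in range(len(planet[0])): …'; [row[j] for row in planet] (j in range on admitted inputs)
def fall_south_alt (planet : List (List String)) : List (List String) :=
  if planet = [] then planet
  else (List.range ((planet.getD 0 []).length)).foldl
    (fun g j => writeCol g j (settle (g.map (fun row => row.getD j "")))) planet

-- ===== PRECONDITION & SPEC =====
-- Pre_ excludes grids with two or more rows in which some row is shorter than the first row:
-- there A's cell probes raise IndexError, except when the short-circuited 'O' test happens to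
-- skip every missing cell; B reads whole columns and raises on all such grids.
def Pre_fall_south (planet : List (List String)) : Prop :=
  planet.length ≤ 1 ∨
    ∀ i, i < planet.length → (planet.getD 0 []).length ≤ (planet.getD i []).length

instance (planet : List (List String)) : Decidable (Pre_fall_south planet) := by
  unfold Pre_fall_south; infer_instance

def pvWitness_fall_south : List (List String) := [["O", "."], [".", "#"]]

def Spec_fall_south (planet : List (List String)) (out : List (List String)) : Prop :=
  out = fall_south_alt planet
instance (planet : List (List String)) (out : List (List String)) : Decidable (Spec_fall_south planet out) := by
  unfold Spec_fall_south; infer_instance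

-- ===== CLAIM (what is proved, stated in full; the proofs are below) =====
def Claim_equal_fall_south : Prop := ∀ (planet : List (List String)),
  Dom_fall_south planet → Pre_fall_south planet → Spec_fall_south planet (fall_south planet)

-- ===== LEMMAS AND PROOFS =====

theorem pv_getD_eq_getElem {α : Type} {l : List α} {n : Nat} (d : α) (h : n < l.length) :
    l.getD n d = l[n] := by
  simp [List.getD, List.getElem?_eq_getElem h]

theorem pv_getD_set_self {α : Type} {l : List α} {j : Nat} (x d : α) (h : j < l.length) :
    (l.set j x).getD j d = x := by
  simp [List.getD, h]

theorem pv_getD_set_ne {α : Type} {l : List α} {j j' : Nat} (x d : α) (h : j ≠ j') :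
    (l.set j x).getD j' d = l.getD j' d := by
  simp [List.getD, h]

theorem settleStep_O (s : List String × Nat × Nat) :
    settleStep s "O" = (s.1, s.2.1 + 1, s.2.2) := by
  rw [settleStep, if_pos rfl]

theorem settleStep_dot (s : List String × Nat × Nat) :
    settleStep s "." = (s.1, s.2.1, s.2.2 + 1) := by
  rw [settleStep, if_neg (by decide : ¬ ("." : String) = "O"), if_pos rfl]

theorem settleStep_other (s : List String × Nat × Nat) (c : String)
    (hO : ¬ c = "O") (hD : ¬ c = ".") :
    settleStep s c = (settleFlush s ++ [c], 0, 0) := by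
  rw [settleStep, if_neg hO, if_neg hD]

-- the column j of g, as a list of rows-many cells
def colOf (g : List (List String)) (j : Nat) : List String :=
  (List.range g.length).map (fun i => pvGet g i j)

theorem colOf_length (g : List (List String)) (j : Nat) : (colOf g j).length = g.length := by
  simp [colOf]

theorem colOf_getD {g : List (List String)} {k : Nat} (j : Nat) (h : k < g.length) :
    (colOf g j).getD k "" = pvGet g k j := by
  rw [pv_getD_eq_getElem "" (by simpa [colOf_length] using h)]
  simp [colOf]

-- the settled grid both programs compute, written as a direct map
def altBody (g : List (List String)) : List (List String) :=
  (List.range g.length).map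
    (fun i => ((List.range ((g.getD 0 []).length)).map
        (fun j => ((((List.range ((g.getD 0 []).length)).map (fun j => settle (colOf g j))).getD j []).getD i "")))
      ++ (g.getD i []).drop ((g.getD 0 []).length))

-- the two middle steps of settle's loop commute on an adjacent 'O','.' pair
theorem settleStep_comm (s : List String × Nat × Nat) :
    settleStep (settleStep s ".") "O" = settleStep (settleStep s "O") "." := by
  obtain ⟨out, os, len⟩ := s
  have hd : ¬ ("." : String) = "O" := by decide
  simp [settleStep, hd]

theorem settle_foldl_swap : ∀ (i : Nat) (col : List String) (s : List String × Nat × Nat),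
    col.getD i "" = "O" → col.getD (i + 1) "" = "." →
    List.foldl settleStep s ((col.set i ".").set (i + 1) "O") = List.foldl settleStep s col := by
  intro i
  induction i with
  | zero =>
    intro col s h1 h2
    match col with
    | [] => simp [List.getD] at h1
    | [c] => simp [List.getD] at h2
    | c :: d :: t =>
      simp only [List.getD_cons_zero] at h1
      simp only [List.getD_cons_succ, List.getD_cons_zero] at h2
      subst h1; subst h2
      simp only [List.set_cons_zero, List.set_cons_succ, List.foldl_cons]
      rw [settleStep_comm]
  | succ i ih =>
    intro col s h1 h2
    match col with
    | [] => simp [List.getD] at h1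
    | c :: t =>
      simp only [List.getD_cons_succ] at h1 h2
      simp only [List.set_cons_succ, List.foldl_cons]
      exact ih t (settleStep s c) h1 h2

theorem settle_swap {col : List String} {i : Nat}
    (h1 : col.getD i "" = "O") (h2 : col.getD (i + 1) "" = ".") :
    settle ((col.set i ".").set (i + 1) "O") = settle col := by
  unfold settle
  rw [settle_foldl_swap i col _ h1 h2]

-- shape bookkeeping
theorem pvSet_length (g : List (List String)) (a b : Nat) (x : String) :
    (pvSet g a b x).length = g.length := by simp [pvSet]

theorem pvSet_row_len (g : List (List String)) (a b : Nat) (x : String) (k : Nat) :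
    ((pvSet g a b x).getD k []).length = (g.getD k []).length := by
  rw [pv_getD_pvSet]
  by_cases h : k = a <;> simp [h]

-- bounds extracted from the move condition
theorem pv_cond_bounds {g : List (List String)} {i j : Nat}
    (h1 : pvGet g i j = "O") (h2 : pvGet g (i + 1) j = ".") :
    i + 1 < g.length ∧ j < (g.getD i []).length ∧ j < (g.getD (i + 1) []).length := by
  refine ⟨?_, ?_, ?_⟩
  · apply pv_getD_lt (d := [])
    intro hh; rw [pvGet, hh] at h2; simp [List.getD] at h2
  · apply pv_getD_lt (d := ""); rw [pvGet] at h1; rw [h1]; simp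
  · apply pv_getD_lt (d := ""); rw [pvGet] at h2; rw [h2]; simp

theorem pvGet_move {g : List (List String)} {i j : Nat} (k j' : Nat)
    (h1 : pvGet g i j = "O") (h2 : pvGet g (i + 1) j = ".") :
    pvGet (pvSet (pvSet g (i + 1) j "O") i j ".") k j' =
      if k = i ∧ j' = j then "."
      else if k = i + 1 ∧ j' = j then "O"
      else pvGet g k j' := by
  obtain ⟨hi1, hji, hji1⟩ := pv_cond_bounds h1 h2
  unfold pvGet
  rw [pv_getD_pvSet]
  by_cases hk : k = i
  · subst hk
    rw [if_pos rfl, pv_getD_pvSet, if_neg (by omega : ¬ k = k + 1)]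
    by_cases hj' : j' = j
    · subst hj'; rw [pv_getD_set_self _ _ hji]; simp
    · rw [pv_getD_set_ne _ _ (fun hh => hj' hh.symm)]
      simp [hj']
  · rw [if_neg hk, pv_getD_pvSet]
    by_cases hk1 : k = i + 1
    · subst hk1; rw [if_pos rfl]
      by_cases hj' : j' = j
      · subst hj'; rw [pv_getD_set_self _ _ hji1]; simp
      · rw [pv_getD_set_ne _ _ (fun hh => hj' hh.symm)]; simp [hj']
    · rw [if_neg hk1]; simp [hk, hk1]

-- the modified grid's columns
theorem colOf_move_ne {g : List (List String)} {i j : Nat} (j' : Nat) (hj' : j' ≠ j)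
    (h1 : pvGet g i j = "O") (h2 : pvGet g (i + 1) j = ".") :
    colOf (pvSet (pvSet g (i + 1) j "O") i j ".") j' = colOf g j' := by
  have hlen : (pvSet (pvSet g (i + 1) j "O") i j ".").length = g.length := by
    rw [pvSet_length, pvSet_length]
  apply List.ext_getElem
  · simp [colOf, hlen]
  · intro k hk1 hk2
    simp only [colOf, hlen, List.getElem_map, List.getElem_range]
    rw [pvGet_move k j' h1 h2]
    simp [hj']

theorem colOf_move_eq {g : List (List String)} {i j : Nat}
    (h1 : pvGet g i j = "O") (h2 : pvGet g (i + 1) j = ".") :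
    colOf (pvSet (pvSet g (i + 1) j "O") i j ".") j
      = ((colOf g j).set i ".").set (i + 1) "O" := by
  have hlen : (pvSet (pvSet g (i + 1) j "O") i j ".").length = g.length := by
    rw [pvSet_length, pvSet_length]
  apply List.ext_getElem
  · simp [colOf, hlen]
  · intro k hk1 hk2
    simp only [colOf, hlen, List.getElem_map, List.getElem_range]
    rw [pvGet_move k j h1 h2]
    rw [List.getElem_set, List.getElem_set]
    simp only [List.getElem_map, List.getElem_range]
    by_cases hki : k = i
    · simp [hki]
    · by_cases hki1 : k = i + 1
      · simp [hki1]
      · simp [hki, hki1, (show ¬ i = k from fun hh => hki hh.symm),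
          (show ¬ i + 1 = k from fun hh => hki1 hh.symm)]

-- the core invariance: one swap-down move does not change the settled grid
theorem altBody_move {g : List (List String)} {i j : Nat}
    (h1 : pvGet g i j = "O") (h2 : pvGet g (i + 1) j = ".")
    (hj : j < (g.getD 0 []).length) :
    altBody (pvSet (pvSet g (i + 1) j "O") i j ".") = altBody g := by
  obtain ⟨hi1, hji, hji1⟩ := pv_cond_bounds h1 h2
  set g2 := pvSet (pvSet g (i + 1) j "O") i j "." with hg2
  have hlen : g2.length = g.length := by rw [hg2, pvSet_length, pvSet_length]
  have hw : (g2.getD 0 []).length = (g.getD 0 []).length := by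
    rw [hg2, pvSet_row_len, pvSet_row_len]
  unfold altBody
  rw [hlen, hw]
  have hcols : (List.range ((g.getD 0 []).length)).map (fun j' => settle (colOf g2 j'))
      = (List.range ((g.getD 0 []).length)).map (fun j' => settle (colOf g j')) := by
    apply List.map_congr_left
    intro j' _
    by_cases hj'j : j' = j
    · subst hj'j
      rw [hg2, colOf_move_eq h1 h2]
      apply settle_swap
      · rw [colOf_getD j' (by omega)]; exact h1
      · rw [colOf_getD j' hi1]; exact h2
    · rw [hg2, colOf_move_ne j' hj'j h1 h2]
  rw [hcols]
  apply List.map_congr_left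
  intro i' _
  congr 1
  -- tails beyond the first row's width are untouched by the move
  rw [hg2]
  rw [pv_getD_pvSet]
  by_cases hii : i' = i
  · rw [if_pos hii, pv_getD_pvSet, if_neg (by omega : ¬ i = i + 1)]
    rw [List.drop_set, if_pos hj, hii]
  · rw [if_neg hii, pv_getD_pvSet]
    by_cases hii1 : i' = i + 1
    · rw [if_pos hii1, List.drop_set, if_pos hj, hii1]
    · rw [if_neg hii1]

-- full invariant carried through one sweep of A
def InvA (g : List (List String)) (s : List (List String) × Bool) : Prop :=
  s.1.length = g.length ∧ (∀ k, (s.1.getD k []).length = (g.getD k []).length) ∧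
  (s.2 = false → s.1 = g) ∧ altBody s.1 = altBody g

theorem InvA_init (g : List (List String)) : InvA g (g, false) := by
  unfold InvA
  exact ⟨rfl, fun _ => rfl, fun _ => rfl, rfl⟩

theorem stepA_InvA {g : List (List String)} {s : List (List String) × Bool}
    (h : InvA g s) (i : Nat) {j : Nat} (hj : j < (s.1.getD 0 []).length) :
    InvA g (stepA i s j) := by
  obtain ⟨hl, hrl, hf, hb⟩ := h
  unfold stepA
  by_cases hc : pvGet s.1 i j = "O" ∧ pvGet s.1 (i + 1) j = "."
  · rw [if_pos hc]
    refine ⟨by simp [pvSet_length, hl],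
      fun k => by rw [pvSet_row_len, pvSet_row_len]; exact hrl k, ?_, ?_⟩
    · intro hh; simp at hh
    · rw [altBody_move hc.1 hc.2 hj, hb]
  · rw [if_neg hc]; exact ⟨hl, hrl, hf, hb⟩

theorem passInner_InvA {g : List (List String)} {s : List (List String) × Bool}
    (h : InvA g s) (i : Nat) : InvA g (passInner s i) := by
  unfold passInner
  refine List.foldlRecOn _ _ h (fun b hb j hjmem => ?_)
  refine stepA_InvA hb i ?_
  have hjlt := List.mem_range.mp hjmem
  have e1 := hb.2.1 0
  have e2 := h.2.1 0
  omega

theorem passA_InvA (g : List (List String)) : InvA g (passA g) := by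
  unfold passA
  exact List.foldlRecOn _ _ (InvA_init g) (fun b hb i _ => passInner_InvA hb i)

-- if some swap is enabled, the sweep reports a move
theorem stepA_flag_true {s : List (List String) × Bool} (i j : Nat) (h : s.2 = true) :
    (stepA i s j).2 = true := by
  unfold stepA
  by_cases hc : pvGet s.1 i j = "O" ∧ pvGet s.1 (i + 1) j = "." <;> simp [hc, h]

theorem passInner_flag_true {s : List (List String) × Bool} (i : Nat) (h : s.2 = true) :
    (passInner s i).2 = true := by
  unfold passInner
  exact List.foldlRecOn (motive := fun (x : List (List String) × Bool) => x.2 = true) _ _ h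
    (fun b hb j _ => stepA_flag_true i j hb)

def Qflag (g : List (List String)) (s : List (List String) × Bool) : Prop :=
  s = (g, false) ∨ s.2 = true

theorem stepA_Qflag {g : List (List String)} {s : List (List String) × Bool}
    (h : Qflag g s) (i j : Nat) : Qflag g (stepA i s j) := by
  rcases h with he | ht
  · subst he
    unfold stepA Qflag
    by_cases hc : pvGet (g, false).1 i j = "O" ∧ pvGet (g, false).1 (i + 1) j = "."
    · rw [if_pos hc]; right; rfl
    · rw [if_neg hc]; left; rfl
  · right; exact stepA_flag_true i j ht

theorem passInner_Qflag {g : List (List String)} {s : List (List String) × Bool}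
    (h : Qflag g s) (i : Nat) : Qflag g (passInner s i) := by
  unfold passInner
  exact List.foldlRecOn _ _ h (fun b hb j _ => stepA_Qflag hb i j)

theorem passA_moved {g : List (List String)} {i j : Nat}
    (hi : i < g.length - 1) (hj : j < (g.getD 0 []).length)
    (hc : pvGet g i j = "O" ∧ pvGet g (i + 1) j = ".") :
    (passA g).2 = true := by
  have habs : ∀ (s : List (List String) × Bool) (l : List Nat), s.2 = true →
      (List.foldl passInner s l).2 = true := by
    intro s l hs
    exact List.foldlRecOn (motive := fun (x : List (List String) × Bool) => x.2 = true) _ _ hs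
      (fun b hb i' _ => passInner_flag_true i' hb)
  have habs2 : ∀ (s : List (List String) × Bool) (l : List Nat), s.2 = true →
      (List.foldl (stepA i) s l).2 = true := by
    intro s l hs
    exact List.foldlRecOn (motive := fun (x : List (List String) × Bool) => x.2 = true) _ _ hs
      (fun b hb j' _ => stepA_flag_true i j' hb)
  obtain ⟨l1, l2, hsplit⟩ := List.append_of_mem (List.mem_range.mpr hi)
  unfold passA
  rw [hsplit, List.foldl_append, List.foldl_cons]
  have hQ1 : Qflag g (List.foldl passInner (g, false) l1) :=
    List.foldlRecOn _ _ (Or.inl rfl) (fun b hb i' _ => passInner_Qflag hb i')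
  rcases hQ1 with he | ht
  · apply habs
    rw [he]
    unfold passInner
    obtain ⟨m1, m2, hm⟩ := List.append_of_mem
      (List.mem_range.mpr (show j < ((((g, false) : List (List String) × Bool)).1.getD 0 []).length from hj))
    rw [hm, List.foldl_append, List.foldl_cons]
    have hQ2 : Qflag g (List.foldl (stepA i) ((g, false) : List (List String) × Bool) m1) :=
      List.foldlRecOn _ _ (Or.inl rfl) (fun b hb j' _ => stepA_Qflag hb i j')
    rcases hQ2 with he2 | ht2
    · apply habs2
      rw [he2]
      unfold stepA
      rw [if_pos hc]
    · apply habs2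
      exact stepA_flag_true i j ht2
  · apply habs
    exact passInner_flag_true i ht

-- a column with no 'O' directly above a '.' is already settled
theorem settle_aux : ∀ (col : List String) (out : List String) (a b : Nat),
    (∀ k, ¬(col.getD k "" = "O" ∧ col.getD (k + 1) "" = ".")) →
    (b ≠ 0 → col.getD 0 "" ≠ ".") →
    settleFlush (col.foldl settleStep (out, b, a))
      = out ++ List.replicate a "." ++ List.replicate b "O" ++ col := by
  intro col
  induction col with
  | nil =>
    intro out a b _ _
    simp [settleFlush]
  | cons c t ih =>
    intro out a b hno hb
    have hnot : ∀ k, ¬(t.getD k "" = "O" ∧ t.getD (k + 1) "" = ".") := fun k => by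
      have := hno (k + 1); simpa using this
    by_cases hO : c = "O"
    · subst hO
      have hstep : ("O" :: t).foldl settleStep (out, b, a)
          = t.foldl settleStep (out, b + 1, a) := by
        rw [List.foldl_cons, settleStep_O]
      rw [hstep]
      rw [ih out a (b + 1) hnot (fun _ => by have := hno 0; simp at this; simpa using this)]
      rw [List.replicate_succ' (n := b)]
      simp
    · by_cases hD : c = "."
      · subst hD
        have hb0 : b = 0 := by
          by_contra hh
          exact hb hh (by simp)
        subst hb0
        have hstep : ("." :: t).foldl settleStep (out, 0, a)
            = t.foldl settleStep (out, 0, a + 1) := by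
          rw [List.foldl_cons, settleStep_dot]
        rw [hstep]
        rw [ih out (a + 1) 0 hnot (by simp)]
        rw [List.replicate_succ' (n := a)]
        simp
      · have hstep : (c :: t).foldl settleStep (out, b, a)
            = t.foldl settleStep (settleFlush (out, b, a) ++ [c], 0, 0) := by
          rw [List.foldl_cons, settleStep_other _ _ hO hD]
        rw [hstep]
        rw [ih (settleFlush (out, b, a) ++ [c]) 0 0 hnot (by simp)]
        simp [settleFlush]

theorem settle_id {col : List String}
    (h : ∀ k, ¬(col.getD k "" = "O" ∧ col.getD (k + 1) "" = ".")) :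
    settle col = col := by
  have := settle_aux col [] 0 0 h (by simp)
  simpa [settle] using this

-- settle preserves the column's length
theorem settle_foldl_length : ∀ (col : List String) (s : List String × Nat × Nat),
    (settleFlush (col.foldl settleStep s)).length = (settleFlush s).length + col.length := by
  intro col
  induction col with
  | nil => intro s; simp
  | cons c t ih =>
    intro s
    rw [List.foldl_cons]
    rw [ih (settleStep s c)]
    have : (settleFlush (settleStep s c)).length = (settleFlush s).length + 1 := by
      by_cases hO : c = "O"
      · subst hO; rw [settleStep_O]; simp [settleFlush]; omega
      · by_cases hD : c = "."
        · subst hD; rw [settleStep_dot]; simp [settleFlush]; omega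
        · rw [settleStep_other _ _ hO hD]; simp [settleFlush]; omega
    simp only [List.length_cons]
    omega

theorem settle_length (col : List String) : (settle col).length = col.length := by
  have := settle_foldl_length col ([], 0, 0)
  simpa [settle, settleFlush] using this

-- rebuilding a row from its first-width cells and its tail
theorem map_range_take (l : List String) (w : Nat) (h : w ≤ l.length) :
    (List.range w).map (fun j => l.getD j "") = l.take w := by
  apply List.ext_getElem
  · simp; omega
  · intro k hk1 hk2
    simp only [List.getElem_map, List.getElem_range, List.getElem_take]
    rw [pv_getD_eq_getElem "" (by simp at hk1; omega)]

theorem map_range_getD_self (g : List (List String)) :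
    (List.range g.length).map (fun i => g.getD i []) = g := by
  apply List.ext_getElem
  · simp
  · intro k hk1 hk2
    simp only [List.getElem_map, List.getElem_range]
    rw [pv_getD_eq_getElem [] hk2]

theorem getD_map_range {α : Type} [Inhabited α] (f : Nat → α) (n j : Nat) (d : α) (h : j < n) :
    ((List.range n).map f).getD j d = f j := by
  rw [pv_getD_eq_getElem d (by simpa using h)]
  simp

-- reading a column by mapping over the rows is reading colOf
theorem map_getD_eq_colOf (g : List (List String)) (j : Nat) :
    g.map (fun row => row.getD j "") = colOf g j := by
  apply List.ext_getElem
  · simp [colOf_length]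
  · intro k hk1 hk2
    simp only [List.getElem_map, colOf, List.getElem_range]
    rw [pvGet, pv_getD_eq_getElem [] (by simpa using hk1)]

-- altBody g = g on a grid in which no swap is enabled (rows at least as long as row 0)
theorem altBody_id {g : List (List String)}
    (hpre' : ∀ i, i < g.length → (g.getD 0 []).length ≤ (g.getD i []).length)
    (h : ∀ i j, i < g.length - 1 → j < (g.getD 0 []).length →
      ¬(pvGet g i j = "O" ∧ pvGet g (i + 1) j = ".")) :
    altBody g = g := by
  unfold altBody
  have hcols : (List.range ((g.getD 0 []).length)).map (fun j => settle (colOf g j))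
      = (List.range ((g.getD 0 []).length)).map (fun j => colOf g j) := by
    apply List.map_congr_left
    intro j hjm
    apply settle_id
    intro k hk
    obtain ⟨hk1, hk2⟩ := hk
    have hk1' : k < g.length := by
      have : k < (colOf g j).length := pv_getD_lt (d := "") (by rw [hk1]; simp)
      simpa [colOf_length] using this
    have hk2' : k + 1 < g.length := by
      have : k + 1 < (colOf g j).length := pv_getD_lt (d := "") (by rw [hk2]; simp)
      simpa [colOf_length] using this
    rw [colOf_getD j hk1'] at hk1
    rw [colOf_getD j hk2'] at hk2
    exact h k j (by omega) (List.mem_range.mp hjm) ⟨hk1, hk2⟩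
  rw [hcols]
  have hrow : ∀ i' ∈ List.range g.length,
      ((List.range ((g.getD 0 []).length)).map
        (fun j => ((((List.range ((g.getD 0 []).length)).map (fun j => colOf g j)).getD j []).getD i' "")))
      ++ (g.getD i' []).drop ((g.getD 0 []).length) = g.getD i' [] := by
    intro i' hi'm
    have hi' := List.mem_range.mp hi'm
    have hinner : (List.range ((g.getD 0 []).length)).map
        (fun j => ((((List.range ((g.getD 0 []).length)).map (fun j => colOf g j)).getD j []).getD i' ""))
        = (List.range ((g.getD 0 []).length)).map (fun j => (g.getD i' []).getD j "") := by
      apply List.map_congr_left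
      intro j hjm
      rw [getD_map_range _ _ _ _ (List.mem_range.mp hjm)]
      rw [colOf_getD j hi']
      rfl
    rw [hinner, map_range_take _ _ (hpre' i' hi')]
    exact List.take_append_drop _ _
  calc (List.range g.length).map
        (fun i => ((List.range ((g.getD 0 []).length)).map
          (fun j => ((((List.range ((g.getD 0 []).length)).map (fun j => colOf g j)).getD j []).getD i "")))
        ++ (g.getD i []).drop ((g.getD 0 []).length))
      = (List.range g.length).map (fun i => g.getD i []) := List.map_congr_left hrow
    _ = g := map_range_getD_self g

-- Pre_ gives the uniform row-length bound
theorem pre_rows {g : List (List String)} (hpre : Pre_fall_south g) :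
    ∀ i, i < g.length → (g.getD 0 []).length ≤ (g.getD i []).length := by
  rcases hpre with h1 | h2
  · intro i hi
    have : i = 0 := by omega
    subst this
    exact le_refl _
  · exact h2

-- A's loop computes the settled grid; induction on the potential
theorem fall_south_eq_altBody : ∀ (g : List (List String)), Pre_fall_south g →
    fall_south g = altBody g := by
  have key : ∀ n (g : List (List String)), mu g < n → Pre_fall_south g →
      fall_south g = altBody g := by
    intro n
    induction n with
    | zero => intro g hg _; omega
    | succ n ih =>
      intro g hg hpre
      rw [fall_south]
      by_cases hm : (passA g).2 = true
      · rw [dif_pos hm]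
        obtain ⟨hl, hrl, hf, hb⟩ := passA_InvA g
        have hmu := pv_passA_mu_lt g hm
        have hpre' : Pre_fall_south (passA g).1 := by
          unfold Pre_fall_south at hpre ⊢
          rcases hpre with h1 | h2
          · left; omega
          · right; intro k hk
            rw [hrl k, hrl 0]
            exact h2 k (by omega)
        rw [ih (passA g).1 (by omega) hpre', hb]
      · rw [dif_neg hm]
        have hg0 : (passA g).1 = g := (passA_InvA g).2.2.1 (by simpa using hm)
        rw [hg0]
        symm
        apply altBody_id (pre_rows hpre)
        intro i j hi hj hc
        exact hm (passA_moved hi hj hc)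
  intro g hpre
  exact key (mu g + 1) g (by omega) hpre

-- ===== B computes the settled grid too: invariant of the write-back fold =====

def InvB (g : List (List String)) (k : Nat) (g' : List (List String)) : Prop :=
  g'.length = g.length ∧ (∀ i, (g'.getD i []).length = (g.getD i []).length) ∧
  ∀ i j', pvGet g' i j'
    = if j' < k ∧ i < g.length then (settle (colOf g j')).getD i "" else pvGet g i j'

-- the write-back loop, cell by cell (prefix of the row indices)
theorem writeCol_prefix (g' : List (List String)) (j : Nat) (settled : List String)
    (hrow : ∀ i, i < g'.length → j < (g'.getD i []).length) :
    ∀ n, n ≤ g'.length →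
      (((List.range n).foldl (fun h i => pvSet h i j (settled.getD i "")) g').length = g'.length
       ∧ (∀ i, ((((List.range n).foldl (fun h i => pvSet h i j (settled.getD i "")) g')).getD i []).length = (g'.getD i []).length)
       ∧ ∀ i j', pvGet ((List.range n).foldl (fun h i => pvSet h i j (settled.getD i "")) g') i j'
           = if i < n ∧ j' = j then settled.getD i "" else pvGet g' i j') := by
  intro n
  induction n with
  | zero =>
    intro _
    refine ⟨rfl, fun _ => rfl, fun i j' => ?_⟩
    simp
  | succ n ih =>
    intro hn
    obtain ⟨hl, hrl, hget⟩ := ih (by omega)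
    set W := (List.range n).foldl (fun h i => pvSet h i j (settled.getD i "")) g' with hW
    have hstep : (List.range (n + 1)).foldl (fun h i => pvSet h i j (settled.getD i "")) g'
        = pvSet W n j (settled.getD n "") := by
      rw [List.range_succ, List.foldl_append, List.foldl_cons, List.foldl_nil]
    rw [hstep]
    refine ⟨by rw [pvSet_length, hl], fun i => by rw [pvSet_row_len]; exact hrl i, ?_⟩
    intro i j'
    rw [pvGet, pv_getD_pvSet]
    by_cases hi : i = n
    · subst hi
      rw [if_pos rfl]
      by_cases hj' : j' = j
      · subst hj'
        rw [pv_getD_set_self _ _ (by rw [hrl i]; exact hrow i (by omega))]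
        simp
      · rw [pv_getD_set_ne _ _ (fun hh => hj' hh.symm)]
        have := hget i j'
        rw [pvGet] at this
        rw [this]
        simp [fun hh => hj' hh]
    · rw [if_neg hi]
      have := hget i j'
      rw [pvGet] at this
      rw [this]
      by_cases hin : i < n ∧ j' = j
      · rw [if_pos hin, if_pos ⟨by omega, hin.2⟩]
      · rw [if_neg hin]
        rw [if_neg ?_]
        rcases Nat.lt_or_ge i n with hlt | hge
        · exact fun hh => hin ⟨hlt, hh.2⟩
        · exact fun hh => hi (by omega)

theorem writeCol_spec (g' : List (List String)) (j : Nat) (settled : List String)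
    (hrow : ∀ i, i < g'.length → j < (g'.getD i []).length) :
    (writeCol g' j settled).length = g'.length
    ∧ (∀ i, ((writeCol g' j settled).getD i []).length = (g'.getD i []).length)
    ∧ ∀ i j', pvGet (writeCol g' j settled) i j'
        = if i < g'.length ∧ j' = j then settled.getD i "" else pvGet g' i j' := by
  unfold writeCol
  exact writeCol_prefix g' j settled hrow g'.length (le_refl _)

theorem colOf_congr {g g' : List (List String)} (j : Nat) (hl : g'.length = g.length)
    (h : ∀ i, i < g.length → pvGet g' i j = pvGet g i j) : colOf g' j = colOf g j := by
  apply List.ext_getElem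
  · simp [colOf_length, hl]
  · intro k hk1 hk2
    simp only [colOf, List.getElem_map, List.getElem_range]
    exact h k (by simpa [colOf_length, hl] using hk2)

theorem InvB_step {g : List (List String)}
    (hpre' : ∀ i, i < g.length → (g.getD 0 []).length ≤ (g.getD i []).length)
    {k : Nat} (hk : k < (g.getD 0 []).length) {g' : List (List String)} (h : InvB g k g') :
    InvB g (k + 1) (writeCol g' k (settle (g'.map (fun row => row.getD k "")))) := by
  obtain ⟨hl, hrl, hget⟩ := h
  have hcolg : colOf g' k = colOf g k := by
    apply colOf_congr k hl
    intro i hi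
    rw [hget i k]
    simp
  have hcol : g'.map (fun row => row.getD k "") = colOf g k := by
    rw [map_getD_eq_colOf, hcolg]
  rw [hcol]
  have hsl : (settle (colOf g k)).length = g.length := by
    rw [settle_length, colOf_length]
  have hrow : ∀ i, i < g'.length → k < (g'.getD i []).length := by
    intro i hi
    rw [hrl i]
    have := hpre' i (by omega)
    omega
  obtain ⟨wl, wrl, wget⟩ := writeCol_spec g' k (settle (colOf g k)) hrow
  refine ⟨by rw [wl, hl], fun i => by rw [wrl i, hrl i], ?_⟩
  intro i j'
  rw [wget i j']
  by_cases hj' : j' = k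
  · subst hj'
    by_cases hi : i < g.length
    · rw [if_pos ⟨by omega, rfl⟩, if_pos ⟨by omega, hi⟩]
    · rw [if_neg (by rw [hl]; exact fun hh => hi hh.1), hget i j']
      rw [if_neg (fun hh => hi hh.2), if_neg (fun hh => hi hh.2)]
  · rw [if_neg (fun hh => hj' hh.2), hget i j']
    by_cases hc : j' < k ∧ i < g.length
    · rw [if_pos hc, if_pos ⟨by omega, hc.2⟩]
    · rw [if_neg hc, if_neg (by intro hh; exact hc ⟨by omega, hh.2⟩)]

theorem InvB_all {g : List (List String)}
    (hpre' : ∀ i, i < g.length → (g.getD 0 []).length ≤ (g.getD i []).length) :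
    ∀ k, k ≤ (g.getD 0 []).length →
      InvB g k ((List.range k).foldl
        (fun h j => writeCol h j (settle (h.map (fun row => row.getD j "")))) g) := by
  intro k
  induction k with
  | zero =>
    intro _
    refine ⟨rfl, fun _ => rfl, fun i j' => by simp⟩
  | succ k ih =>
    intro hk
    rw [List.range_succ, List.foldl_append, List.foldl_cons, List.foldl_nil]
    exact InvB_step hpre' (by omega) (ih (by omega))

-- B's fold produces the settled grid
theorem alt_eq_altBody {g : List (List String)} (hpre : Pre_fall_south g) :
    fall_south_alt g = altBody g := by
  by_cases hnil : g = []
  · subst hnil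
    rw [fall_south_alt, if_pos rfl]
    rfl
  · have hpre' := pre_rows hpre
    rw [fall_south_alt, if_neg hnil]
    obtain ⟨hl, hrl, hget⟩ := InvB_all hpre' ((g.getD 0 []).length) (le_refl _)
    set w := (g.getD 0 []).length with hw
    set G := (List.range w).foldl
      (fun h j => writeCol h j (settle (h.map (fun row => row.getD j "")))) g with hG
    apply List.ext_getElem
    · rw [hl]; simp [altBody]
    · intro i hi1 hi2
      have hig : i < g.length := by omega
      have hrowlen : G[i].length = (g.getD i []).length := by
        rw [← pv_getD_eq_getElem [] hi1]; exact hrl i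
      have hWle : w ≤ (g.getD i []).length := hpre' i hig
      have haltrow : (altBody g)[i]
          = ((List.range w).map
              (fun j => ((((List.range w).map (fun j => settle (colOf g j))).getD j []).getD i "")))
            ++ (g.getD i []).drop w := by
        simp only [altBody, List.getElem_map, List.getElem_range, hw]
      rw [haltrow]
      apply List.ext_getElem
      · rw [hrowlen]
        simp only [List.length_append, List.length_map, List.length_range, List.length_drop]
        omega
      · intro j' hj'1 hj'2
        have hj'L : j' < (g.getD i []).length := by omega
        have hGij : G[i][j'] = pvGet G i j' := by
          rw [pvGet, pv_getD_eq_getElem [] hi1, pv_getD_eq_getElem "" hj'1]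
        rw [hGij, hget i j']
        by_cases hjw : j' < w
        · rw [if_pos ⟨hjw, hig⟩]
          rw [List.getElem_append_left (by simpa using hjw)]
          rw [List.getElem_map]
          simp only [List.getElem_range]
          rw [getD_map_range _ _ _ _ hjw]
        · rw [if_neg (fun hh => hjw hh.1)]
          rw [List.getElem_append_right (by simp; omega)]
          simp only [List.length_map, List.length_range, List.getElem_drop]
          have hidx : w + (j' - w) = j' := by omega
          simp only [hidx]
          rw [pvGet]
          exact pv_getD_eq_getElem "" hj'L

-- ===== VERDICT (by name: the statement is the Claim_ definition above) =====
theorem fall_south_spec : Claim_equal_fall_south := by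
  intro planet _ hpre
  unfold Spec_fall_south
  rw [fall_south_eq_altBody planet hpre, alt_eq_altBody hpre]
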